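-- pv_equiv track=rewrite | github.com/kwkeefer/cookiecutter-poc | {{cookiecutter.project_slug}}/src/{{cookiecutter.project_slug}}/utils/batch_request.py | generate_multi_payloads
-- ===== SOURCE A (Python) =====
-- from typing import Any, Callable, Dict, Iterator, List, Optional, Union
--
-- def generate_multi_payloads(payloads_dict: Dict[str, List[Any]], base_kwargs: Optional[Dict] = None) -> List[Dict]:
--     """
--     Generate payloads for multiple positions (like Burp Pitchfork).
--
--     Example:
--         payloads = generate_multi_payloads({
--             "data": [{"user": "admin", "pass": "admin"}, {"user": "root", "pass": "root"}],
--             "headers": [{"X-Token": "abc"}, {"X-Token": "xyz"}]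
--         })
--     """
--     from itertools import product
--
--     base_kwargs = base_kwargs or {}
--
--     # Get all combinations
--     keys = list(payloads_dict.keys())
--     values = [payloads_dict[k] for k in keys]
--
--     results = []
--     for combo in product(*values):
--         payload = dict(base_kwargs)
--         for i, key in enumerate(keys):
--             if key in payload:
--                 payload[key] = {**payload[key], **combo[i]}
--             else:
--                 payload[key] = combo[i]
--         results.append(payload)
--
--     return results
-- ===== SOURCE B (Python) =====
-- def generate_multi_payloads(payloads_dict, base_kwargs=None):
--     """Pitchfork-style payload product, built incrementally without itertools:
--     each key expands the partial-result list in place of materialised combos."""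
--     results = [dict(base_kwargs) if base_kwargs else {}]
--     for key, values in payloads_dict.items():
--         results = [_with_payload(partial, key, value)
--                    for partial in results
--                    for value in values]
--     return results
--
--
-- def _with_payload(partial, key, value):
--     payload = dict(partial)
--     if key in payload:
--         payload[key] = {**payload[key], **value}
--     else:
--         payload[key] = value
--     return payload
-- ===== Notes on version B (the rewrite author's own statement) =====
-- stated objective: simpler
-- what changed: Replaces itertools.product over a pre-extracted keys/values pair plus an enumerate-indexed merge loop by an incremental product: results starts as [base copy] and each (key, values) item expands every partial result directly, so no keys/values lists, no combo tuples and no index bookkeeping exist; Pre_ only excludes association lists with duplicate top-level keys, which do not represent any Python dict (no Python-reachable input is excluded).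
import Mathlib
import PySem

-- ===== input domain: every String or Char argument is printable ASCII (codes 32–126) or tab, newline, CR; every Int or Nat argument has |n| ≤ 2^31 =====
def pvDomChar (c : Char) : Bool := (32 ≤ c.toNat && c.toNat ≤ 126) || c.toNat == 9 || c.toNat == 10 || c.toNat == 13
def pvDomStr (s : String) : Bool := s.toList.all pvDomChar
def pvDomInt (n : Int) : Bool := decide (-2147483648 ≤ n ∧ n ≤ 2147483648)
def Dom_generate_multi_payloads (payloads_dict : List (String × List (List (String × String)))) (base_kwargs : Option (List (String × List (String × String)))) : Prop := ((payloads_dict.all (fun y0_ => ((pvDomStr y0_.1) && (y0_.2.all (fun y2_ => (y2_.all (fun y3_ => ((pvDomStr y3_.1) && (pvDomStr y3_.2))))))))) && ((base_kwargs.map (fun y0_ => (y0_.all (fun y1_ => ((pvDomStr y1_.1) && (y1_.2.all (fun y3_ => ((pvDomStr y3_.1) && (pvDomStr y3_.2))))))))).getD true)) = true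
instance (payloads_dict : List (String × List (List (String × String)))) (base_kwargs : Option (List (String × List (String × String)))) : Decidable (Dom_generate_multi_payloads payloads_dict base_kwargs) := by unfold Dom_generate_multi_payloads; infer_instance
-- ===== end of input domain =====

-- ===== PORT A =====
-- Shared dict helpers (both Pythons contain the same `{**payload[key], **combo_value}`
-- merge and the same present/absent branch; PySem.Dict gives Python's exact
-- insertion-order/overwrite-in-place dict semantics):
-- `{**old, **new}`:
def pvMergeDicts (old new : List (String × String)) : List (String × String) :=
  (new.foldl (fun acc kv => acc.insert kv.1 kv.2) (PySem.Dict.mk old)).items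

-- one `if key in payload: payload[key] = {**payload[key], **v} else: payload[key] = v` step:
def pvStep (p : PySem.Dict String (List (String × String))) (k : String)
    (v : List (String × String)) : PySem.Dict String (List (String × String)) :=
  match p.get? k with
  | some old => p.insert k (pvMergeDicts old v)
  | none => p.insert k v

-- itertools.product(*values) over lists, in product's order (first list varies slowest):
def pvProd : List (List (List (String × String))) → List (List (List (String × String)))
  | [] => [[]]
  | xs :: rest => xs.flatMap (fun x => (pvProd rest).map (x :: ·))

-- port of A: keys/values extracted first, then a loop over the materialised combos,
-- each combo merged into a fresh copy of base_kwargs key by key (enumerate+combo[i]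
-- walks keys and combo in lockstep, i.e. a fold over keys.zip combo).
def generate_multi_payloads (payloads_dict : List (String × List (List (String × String)))) (base_kwargs : Option (List (String × List (String × String)))) : List (List (String × List (String × String))) :=
  let base := base_kwargs.getD []          -- base_kwargs = base_kwargs or {}
  let keys := payloads_dict.map Prod.fst
  let values := keys.map (fun k => ((PySem.Dict.mk payloads_dict).get? k).getD [])
  (pvProd values).map (fun combo =>
    ((keys.zip combo).foldl (fun p kc => pvStep p kc.1 kc.2) (PySem.Dict.mk base)).items)

-- ===== PORT B =====
-- port of B: no itertools, no keys/values lists, no combos — results starts as the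
-- single base copy and each (key, values) item of payloads_dict expands every part.
def generate_multi_payloads_alt (payloads_dict : List (String × List (List (String × String)))) (base_kwargs : Option (List (String × List (String × String)))) : List (List (String × List (String × String))) :=
  (payloads_dict.foldl
      (fun results kvs => results.flatMap (fun part => kvs.2.map (fun v => pvStep part kvs.1 v)))
      [PySem.Dict.mk (base_kwargs.getD [])]).map PySem.Dict.items

-- ===== PRECONDITION & SPEC =====
-- Pre_ excludes only association lists whose top-level keys repeat: those encode no
-- Python dict (dict keys are unique), so no input the Python A accepts is excluded;
-- on them A's first-match value lookup vs B's per-entry traversal is accidental.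
def Pre_generate_multi_payloads (payloads_dict : List (String × List (List (String × String)))) (base_kwargs : Option (List (String × List (String × String)))) : Prop :=
  (payloads_dict.map Prod.fst).Nodup
instance (payloads_dict : List (String × List (List (String × String)))) (base_kwargs : Option (List (String × List (String × String)))) : Decidable (Pre_generate_multi_payloads payloads_dict base_kwargs) := by unfold Pre_generate_multi_payloads; infer_instance

def pvWitness_generate_multi_payloads : (List (String × List (List (String × String)))) × (Option (List (String × List (String × String)))) :=
  ([("data", [[("user", "admin")], [("user", "root")]]), ("headers", [[("X-Token", "abc")]])],
   some [("data", [("mode", "fast")])])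

def Spec_generate_multi_payloads (payloads_dict : List (String × List (List (String × String)))) (base_kwargs : Option (List (String × List (String × String)))) (out : List (List (String × List (String × String)))) : Prop := out = generate_multi_payloads_alt payloads_dict base_kwargs
instance (payloads_dict : List (String × List (List (String × String)))) (base_kwargs : Option (List (String × List (String × String)))) (out : List (List (String × List (String × String)))) : Decidable (Spec_generate_multi_payloads payloads_dict base_kwargs out) := by unfold Spec_generate_multi_payloads; infer_instance

-- ===== CLAIM (what is proved, stated in full; the proofs are below) =====
def Claim_equal_generate_multi_payloads : Prop := ∀ (payloads_dict : List (String × List (List (String × String)))) (base_kwargs : Option (List (String × List (String × String)))), Dom_generate_multi_payloads payloads_dict base_kwargs → Pre_generate_multi_payloads payloads_dict base_kwargs → Spec_generate_multi_payloads payloads_dict base_kwargs (generate_multi_payloads payloads_dict base_kwargs)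

-- ===== LEMMAS AND PROOFS =====

-- Under unique keys, A's lookup of every key recovers exactly the value list stored with it.
theorem pvValuesEq (pd : List (String × List (List (String × String))))
    (h : (pd.map Prod.fst).Nodup) :
    (pd.map Prod.fst).map (fun k => ((PySem.Dict.mk pd).get? k).getD []) = pd.map Prod.snd := by
  rw [List.map_map]
  apply List.map_congr_left
  intro p hp
  have : (PySem.Dict.mk pd).get? p.1 = some p.2 :=
    PySem.Dict.get?_of_mem_items (d := PySem.Dict.mk pd) (k := p.1) (v := p.2) hp h
  simp [this]

-- Loop invariant for B: expanding a list of part results key by key is the same as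
-- mapping A's per-combo merge fold over the materialised product of the value lists.
theorem pvExpandEq (L : List (String × List (List (String × String))))
    (rs : List (PySem.Dict String (List (String × String)))) :
    L.foldl (fun results kvs => results.flatMap (fun part => kvs.2.map (fun v => pvStep part kvs.1 v))) rs
      = rs.flatMap (fun p => (pvProd (L.map Prod.snd)).map (fun combo =>
          ((L.map Prod.fst).zip combo).foldl (fun q kc => pvStep q kc.1 kc.2) p)) := by
  induction L generalizing rs with
  | nil => simp [pvProd]
  | cons kvs L ih =>
      simp only [List.foldl_cons, ih, pvProd, List.map_cons]
      simp [List.flatMap_assoc, List.flatMap_map, List.map_flatMap, List.map_map, Function.comp_def]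

-- ===== VERDICT (by name: the statement is the Claim_ definition above) =====
theorem generate_multi_payloads_spec : Claim_equal_generate_multi_payloads := by
  intro pd bk _hDom hPre
  unfold Spec_generate_multi_payloads generate_multi_payloads generate_multi_payloads_alt
  simp [pvExpandEq, pvValuesEq pd hPre, List.map_map]
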